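-- pv_equiv track=rewrite | github.com/eliottcassidy2000/math | 04-computation/fC_muC_n9_test.py | I_at_2_fast
-- ===== SOURCE A (Python) =====
-- def I_at_2_fast(cycles_list):
--     """Compute I(conflict graph, 2) via branch-and-bound on max-degree vertex."""
--     nc = len(cycles_list)
--     if nc == 0:
--         return 1
--     cvsets = [frozenset(c) for c in cycles_list]
--     adj_dict = {}
--     for i in range(nc):
--         adj_dict[i] = frozenset(j for j in range(nc) if j != i and cvsets[i] & cvsets[j])
--     memo = {}
--     def solve(verts):
--         if verts in memo:
--             return memo[verts]
--         if not verts: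
--             return 1
--         v = max(verts, key=lambda u: len(adj_dict[u] & verts))
--         p1 = solve(verts - {v})
--         p2 = solve(verts - (adj_dict[v] & verts) - {v})
--         result = p1 + 2 * p2
--         memo[verts] = result
--         return result
--     return solve(frozenset(range(nc)))
-- ===== SOURCE B (Python) =====
-- def I_at_2_fast(cycles_list):
--     """Compute I(conflict graph, 2) by dynamic programming over the vertices:
--     grow the explicit list of independent sets one vertex at a time, then
--     sum 2**len(s) over all independent sets (the empty set contributes 1)."""
--     nc = len(cycles_list)
--     cv = [frozenset(c) for c in cycles_list]
--     indep_sets = [[]]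
--     for v in range(nc):
--         new_sets = [s + [v] for s in indep_sets
--                     if all(not (cv[u] & cv[v]) for u in s)]
--         indep_sets = indep_sets + new_sets
--     return sum(2 ** len(s) for s in indep_sets)
-- ===== Notes on version B (the rewrite author's own statement) =====
-- stated objective: simpler
-- what changed: Replaces the memoized branch-and-bound recursion on the max-degree pivot by a flat dynamic-programming loop that grows the explicit list of all independent sets one vertex at a time and then sums 2**len(s) over them.
import Mathlib
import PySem

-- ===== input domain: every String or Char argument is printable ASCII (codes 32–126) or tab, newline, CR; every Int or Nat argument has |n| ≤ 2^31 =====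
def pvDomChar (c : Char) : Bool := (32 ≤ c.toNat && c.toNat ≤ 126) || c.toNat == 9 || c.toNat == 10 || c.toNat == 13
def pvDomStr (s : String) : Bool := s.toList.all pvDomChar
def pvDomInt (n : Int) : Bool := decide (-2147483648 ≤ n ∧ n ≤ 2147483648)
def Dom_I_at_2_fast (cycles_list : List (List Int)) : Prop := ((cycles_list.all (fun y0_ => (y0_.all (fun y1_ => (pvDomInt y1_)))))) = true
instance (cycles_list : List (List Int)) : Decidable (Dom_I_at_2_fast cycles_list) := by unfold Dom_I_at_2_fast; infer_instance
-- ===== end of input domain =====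

-- B replaces A's memoized branch-and-bound recursion by a flat vertex-by-vertex DP that
-- explicitly enumerates all independent sets of the conflict graph and sums 2^|S|
-- (simpler/alternative; not claimed faster).

-- ===== PORT A =====
-- shared tiny accessors for "cvsets[i]" and truthiness of "cvsets[i] & cvsets[j]"
-- (index is always in range where the Pythons use it, so pyGetD's default is never read)
def pvCvAt (cv : List (PySem.Set Int)) (i : Int) : PySem.Set Int :=
  PySem.List.pyGetD cv i PySem.Set.empty

def pvOverlap (s t : PySem.Set Int) : Bool :=
  !(PySem.Set.inter s t).isEmpty

-- adj_dict = {i: frozenset(j for j in range(nc) if j != i and cvsets[i] & cvsets[j])}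
def pvAdjDict (cv : List (PySem.Set Int)) (nc : Nat) : PySem.Dict Int (PySem.Set Int) :=
  (PySem.List.pyRange 0 nc 1).foldl
    (fun d i => d.insert i (PySem.Set.ofList ((PySem.List.pyRange 0 nc 1).filter
      (fun j => decide (j ≠ i) && pvOverlap (pvCvAt cv i) (pvCvAt cv j)))))
    PySem.Dict.empty

-- solve(verts) with the memo threaded through; fuel only makes the recursion structural
-- (it starts at nc+1 > |verts| and never runs out)
def pvSolve (adj : PySem.Dict Int (PySem.Set Int)) :
    Nat → PySem.Set Int → PySem.Dict (PySem.Set Int) Int → Int × PySem.Dict (PySem.Set Int) Int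
  | 0, _, memo => (0, memo)
  | fuel+1, verts, memo =>
    match memo.get? verts with
    | some r => (r, memo)
    | none =>
      if verts.isEmpty then (1, memo)
      else
        let v := PySem.List.maxD verts
          (fun u => (PySem.Set.inter (adj.getD u PySem.Set.empty) verts).length) 0
        let r1 := pvSolve adj fuel (PySem.Set.diff verts [v]) memo
        let r2 := pvSolve adj fuel
          (PySem.Set.diff (PySem.Set.diff verts (PySem.Set.inter (adj.getD v PySem.Set.empty) verts)) [v]) r1.2
        let res := r1.1 + 2 * r2.1
        (res, r2.2.insert verts res)

def I_at_2_fast (cycles_list : List (List Int)) : Int :=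
  let nc := cycles_list.length
  if nc = 0 then 1
  else
    let cvsets := cycles_list.map PySem.Set.ofList
    let adj_dict := pvAdjDict cvsets nc
    (pvSolve adj_dict (nc + 1) (PySem.Set.ofList (PySem.List.pyRange 0 nc 1)) PySem.Dict.empty).1

-- ===== PORT B =====
def I_at_2_fast_alt (cycles_list : List (List Int)) : Int :=
  let nc := cycles_list.length
  let cv := cycles_list.map PySem.Set.ofList
  let indep_sets := (PySem.List.pyRange 0 nc 1).foldl
    (fun sets v =>
      sets ++ (sets.filter (fun s =>
        s.all (fun u => !pvOverlap (pvCvAt cv u) (pvCvAt cv v)))).map (fun s => s ++ [v]))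
    [[]]
  (indep_sets.map (fun s => (2 : Int) ^ s.length)).sum

-- ===== PRECONDITION & SPEC =====
def Spec_I_at_2_fast (cycles_list : List (List Int)) (out : Int) : Prop := out = I_at_2_fast_alt cycles_list
instance (cycles_list : List (List Int)) (out : Int) : Decidable (Spec_I_at_2_fast cycles_list out) := by unfold Spec_I_at_2_fast; infer_instance

-- ===== CLAIM (what is proved, stated in full; the proofs are below) =====
def Claim_equal_I_at_2_fast : Prop := ∀ (cycles_list : List (List Int)), Dom_I_at_2_fast cycles_list → Spec_I_at_2_fast cycles_list (I_at_2_fast cycles_list)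

-- ===== LEMMAS AND PROOFS =====

-- the conflict relation of the graph both programs work on
def pvAdj (cl : List (List Int)) (i j : Int) : Bool :=
  decide (i ≠ j) && decide (0 ≤ i) && decide (i < (cl.length : Int)) &&
  decide (0 ≤ j) && decide (j < (cl.length : Int)) &&
  pvOverlap (pvCvAt (cl.map PySem.Set.ofList) i) (pvCvAt (cl.map PySem.Set.ofList) j)

-- independence of a list of vertices, as a Bool
def pvIndB (cl : List (List Int)) (s : List Int) : Bool :=
  s.all (fun u => s.all (fun w => !pvAdj cl u w))

-- the common specification: the independence polynomial at 2 over the vertex set s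
def pvIS (cl : List (List Int)) (s : Finset Int) : Int :=
  ∑ t ∈ s.powerset, if (∀ u ∈ t, ∀ w ∈ t, pvAdj cl u w = false) then 2 ^ t.card else 0

lemma pvOverlap_iff (s t : PySem.Set Int) : pvOverlap s t = true ↔ ∃ x ∈ s, x ∈ t := by
  simp only [pvOverlap, Bool.not_eq_true', ← Bool.not_eq_true, List.isEmpty_iff,
    List.eq_nil_iff_forall_not_mem]
  push Not
  constructor
  · rintro ⟨x, hx⟩
    rcases (PySem.Set.mem_inter s t x).mp hx with ⟨h1, h2⟩
    exact ⟨x, h1, h2⟩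
  · rintro ⟨x, h1, h2⟩
    exact ⟨x, (PySem.Set.mem_inter s t x).mpr ⟨h1, h2⟩⟩

lemma pvOverlap_symm (s t : PySem.Set Int) : pvOverlap s t = pvOverlap t s := by
  rw [Bool.eq_iff_iff, pvOverlap_iff, pvOverlap_iff]
  constructor <;> rintro ⟨x, h1, h2⟩ <;> exact ⟨x, h2, h1⟩

lemma pvAdj_symm (cl : List (List Int)) (i j : Int) : pvAdj cl i j = pvAdj cl j i := by
  rw [Bool.eq_iff_iff]
  simp only [pvAdj, Bool.and_eq_true, decide_eq_true_eq, pvOverlap_iff]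
  constructor <;> rintro ⟨⟨⟨⟨⟨h1, h2⟩, h3⟩, h4⟩, h5⟩, x, hx1, hx2⟩ <;>
    exact ⟨⟨⟨⟨⟨h1.symm, h4⟩, h5⟩, h2⟩, h3⟩, x, hx2, hx1⟩

lemma pvAdj_irrefl (cl : List (List Int)) (i : Int) : pvAdj cl i i = false := by
  simp [pvAdj]

lemma pvIndB_iff (cl : List (List Int)) (s : List Int) :
    pvIndB cl s = true ↔ ∀ u ∈ s, ∀ w ∈ s, pvAdj cl u w = false := by
  simp [pvIndB, List.all_eq_true]

lemma pvIndB_concat (cl : List (List Int)) (s : List Int) (a : Int) :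
    pvIndB cl (s ++ [a]) = true ↔
      pvIndB cl s = true ∧ ∀ u ∈ s, pvAdj cl a u = false := by
  simp only [pvIndB_iff, List.mem_append, List.mem_singleton]
  constructor
  · intro h
    refine ⟨fun u hu w hw => h u (Or.inl hu) w (Or.inl hw),
      fun u hu => ?_⟩
    rw [pvAdj_symm]
    exact h u (Or.inl hu) a (Or.inr rfl)
  · rintro ⟨h1, h2⟩ u hu w hw
    rcases hu with hu | huv
    · rcases hw with hw | hwv
      · exact h1 u hu w hw
      · rw [hwv, pvAdj_symm]; exact h2 u hu
    · rcases hw with hw | hwv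
      · rw [huv]; exact h2 w hw
      · rw [huv, hwv]; exact pvAdj_irrefl cl a

lemma pvIS_empty (cl : List (List Int)) : pvIS cl ∅ = 1 := by
  simp [pvIS]

lemma pvIS_insert (cl : List (List Int)) (s : Finset Int) (v : Int) (hv : v ∉ s) :
    pvIS cl (insert v s) =
      pvIS cl s + 2 * pvIS cl (s.filter (fun u => pvAdj cl v u = false)) := by
  unfold pvIS
  rw [Finset.sum_powerset_insert hv]
  congr 1
  have h1 : ∀ t ∈ s.powerset,
      (if (∀ u ∈ insert v t, ∀ w ∈ insert v t, pvAdj cl u w = false)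
         then (2 : Int) ^ (insert v t).card else 0)
      = (if ((∀ u ∈ t, ∀ w ∈ t, pvAdj cl u w = false) ∧ ∀ u ∈ t, pvAdj cl v u = false)
         then 2 * 2 ^ t.card else 0) := by
    intro t ht
    have hvt : v ∉ t := fun h => hv (Finset.mem_powerset.mp ht h)
    have hiff : (∀ u ∈ insert v t, ∀ w ∈ insert v t, pvAdj cl u w = false) ↔
        ((∀ u ∈ t, ∀ w ∈ t, pvAdj cl u w = false) ∧ ∀ u ∈ t, pvAdj cl v u = false) := by
      constructor
      · intro h
        exact ⟨fun u hu w hw => h u (Finset.mem_insert_of_mem hu) w (Finset.mem_insert_of_mem hw),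
          fun u hu => h v (Finset.mem_insert_self _ _) u (Finset.mem_insert_of_mem hu)⟩
      · rintro ⟨ha, hb⟩ u hu w hw
        rcases Finset.mem_insert.mp hu with huv | hu
        · rcases Finset.mem_insert.mp hw with hwv | hw
          · rw [huv, hwv]; exact pvAdj_irrefl cl v
          · rw [huv]; exact hb w hw
        · rcases Finset.mem_insert.mp hw with hwv | hw
          · rw [hwv, pvAdj_symm]; exact hb u hu
          · exact ha u hu w hw
    rw [Finset.card_insert_of_notMem hvt]
    simp only [hiff, pow_succ]
    ring_nf
  rw [Finset.sum_congr rfl h1]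
  have hsub : (s.filter (fun u => pvAdj cl v u = false)).powerset ⊆ s.powerset :=
    Finset.powerset_mono.mpr (Finset.filter_subset _ s)
  rw [← Finset.sum_subset hsub]
  · rw [Finset.mul_sum]
    refine Finset.sum_congr rfl fun t ht => ?_
    have h2 : ∀ u ∈ t, pvAdj cl v u = false := fun u hu =>
      (Finset.mem_filter.mp (Finset.mem_powerset.mp ht hu)).2
    simp only [mul_ite, mul_zero]
    rw [if_congr (and_iff_left h2) rfl rfl]
  · intro t ht hnt
    rw [if_neg]
    rintro ⟨hI, hQ⟩
    exact hnt (Finset.mem_powerset.mpr fun u hu =>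
      Finset.mem_filter.mpr ⟨Finset.mem_powerset.mp ht hu, hQ u hu⟩)

lemma pvIS_erase (cl : List (List Int)) (s : Finset Int) (v : Int) (hv : v ∈ s) :
    pvIS cl s =
      pvIS cl (s.erase v) + 2 * pvIS cl ((s.erase v).filter (fun u => pvAdj cl v u = false)) := by
  conv_lhs => rw [← Finset.insert_erase hv]
  exact pvIS_insert cl (s.erase v) v (Finset.notMem_erase v s)

-- A-side: what the adjacency dict answers
lemma pvAdjDict_getD (cl : List (List Int)) (v w : Int) :
    (w ∈ (pvAdjDict (cl.map PySem.Set.ofList) cl.length).getD v PySem.Set.empty) ↔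
      pvAdj cl v w = true := by
  have hkeysnd : (PySem.List.pyRange 0 (cl.length : Int) 1).Nodup :=
    PySem.List.nodup_pyRange_one 0 cl.length
  have hitems := PySem.Dict.items_foldl_insert_fresh
      (l := PySem.List.pyRange 0 (cl.length : Int) 1)
      (k := fun a => a)
      (v := fun i => PySem.Set.ofList ((PySem.List.pyRange 0 (cl.length : Int) 1).filter
        (fun j => decide (j ≠ i) && pvOverlap (pvCvAt (cl.map PySem.Set.ofList) i)
          (pvCvAt (cl.map PySem.Set.ofList) j))))
      (d := PySem.Dict.empty)
      (fun a _ => PySem.Dict.contains_empty a)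
      (by simpa using hkeysnd)
  have hit : (pvAdjDict (cl.map PySem.Set.ofList) cl.length).items =
      (PySem.List.pyRange 0 (cl.length : Int) 1).map (fun a =>
        (a, PySem.Set.ofList ((PySem.List.pyRange 0 (cl.length : Int) 1).filter
          (fun j => decide (j ≠ a) && pvOverlap (pvCvAt (cl.map PySem.Set.ofList) a)
            (pvCvAt (cl.map PySem.Set.ofList) j))))) := by
    unfold pvAdjDict
    rw [hitems]
    rfl
  have hkeys : (pvAdjDict (cl.map PySem.Set.ofList) cl.length).keys =
      PySem.List.pyRange 0 (cl.length : Int) 1 := by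
    unfold pvAdjDict
    rw [PySem.Dict.keys_foldl_insert
      (f := fun _ i => PySem.Set.ofList ((PySem.List.pyRange 0 (cl.length : Int) 1).filter
        (fun j => decide (j ≠ i) && pvOverlap (pvCvAt (cl.map PySem.Set.ofList) i)
          (pvCvAt (cl.map PySem.Set.ofList) j)))),
      PySem.Dict.keys_empty, PySem.Set.update_nil_left]
    exact PySem.Set.ofList_eq_self_of_nodup _ hkeysnd
  by_cases hv : v ∈ PySem.List.pyRange 0 (cl.length : Int) 1
  · have hmemit : (v, PySem.Set.ofList ((PySem.List.pyRange 0 (cl.length : Int) 1).filter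
        (fun j => decide (j ≠ v) && pvOverlap (pvCvAt (cl.map PySem.Set.ofList) v)
          (pvCvAt (cl.map PySem.Set.ofList) j)))) ∈
        (pvAdjDict (cl.map PySem.Set.ofList) cl.length).items := by
      rw [hit]; exact List.mem_map.mpr ⟨v, hv, rfl⟩
    rw [PySem.Dict.getD_of_mem_items _ hmemit (hkeys ▸ hkeysnd) PySem.Set.empty]
    have hv' := PySem.List.mem_pyRange_one.mp hv
    simp only [PySem.Set.mem_ofList, List.mem_filter, PySem.List.mem_pyRange_one,
      Bool.and_eq_true, decide_eq_true_eq, pvAdj]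
    constructor
    · rintro ⟨⟨hw0, hwlt⟩, hne, hov⟩
      exact ⟨⟨⟨⟨⟨Ne.symm hne, hv'.1⟩, hv'.2⟩, hw0⟩, hwlt⟩, hov⟩
    · rintro ⟨⟨⟨⟨⟨hne, _⟩, _⟩, hw0⟩, hwlt⟩, hov⟩
      exact ⟨⟨hw0, hwlt⟩, Ne.symm hne, hov⟩
  · have hc : (pvAdjDict (cl.map PySem.Set.ofList) cl.length).contains v = false := by
      rw [PySem.Dict.contains_eq_decide_mem_keys, hkeys]
      simp [hv]
    rw [PySem.Dict.getD_of_not_contains _ PySem.Set.empty hc]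
    constructor
    · intro h; exact absurd h List.not_mem_nil
    · intro h
      exfalso
      apply hv
      simp only [pvAdj, Bool.and_eq_true, decide_eq_true_eq] at h
      exact PySem.List.mem_pyRange_one.mpr ⟨h.1.1.1.1.2, h.1.1.1.2⟩

lemma pvDiff_sublist (s t : PySem.Set Int) : (PySem.Set.diff s t).Sublist s :=
  List.filter_sublist

lemma pvSublist_lt (l s : List Int) (v : Int) (h : l.Sublist s) (hv : v ∈ s) (hnv : v ∉ l) :
    l.length < s.length := by
  rcases Nat.lt_or_ge l.length s.length with h1 | h1
  · exact h1
  · exact absurd (h.eq_of_length (Nat.le_antisymm h.length_le h1) ▸ hv) hnv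

lemma pvDiff_lt (s t : PySem.Set Int) (v : Int) (hv : v ∈ s) :
    (PySem.Set.diff (PySem.Set.diff s t) [v]).length < s.length := by
  exact pvSublist_lt _ _ v ((pvDiff_sublist _ _).trans (pvDiff_sublist _ _)) hv
    (by simp [PySem.Set.mem_diff])

lemma pvDiff_singleton_lt (s : PySem.Set Int) (v : Int) (hv : v ∈ s) :
    (PySem.Set.diff s [v]).length < s.length := by
  exact pvSublist_lt _ _ v (pvDiff_sublist _ _) hv (by simp [PySem.Set.mem_diff])

lemma pvDiff_singleton_toFinset (s : PySem.Set Int) (v : Int) :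
    (PySem.Set.diff s [v]).toFinset = s.toFinset.erase v := by
  ext x
  simp [PySem.Set.mem_diff, Finset.mem_erase, and_comm]

def pvGoodMemo (cl : List (List Int)) (memo : PySem.Dict (PySem.Set Int) Int) : Prop :=
  ∀ k r, memo.get? k = some r → r = pvIS cl k.toFinset

lemma pvSolve_correct (cl : List (List Int)) :
    ∀ (fuel : Nat) (verts : PySem.Set Int) (memo : PySem.Dict (PySem.Set Int) Int),
      verts.Nodup → verts.length < fuel → pvGoodMemo cl memo →
      (pvSolve (pvAdjDict (cl.map PySem.Set.ofList) cl.length) fuel verts memo).1 = pvIS cl verts.toFinset ∧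
      pvGoodMemo cl (pvSolve (pvAdjDict (cl.map PySem.Set.ofList) cl.length) fuel verts memo).2 := by
  intro fuel
  induction fuel with
  | zero => exact fun verts memo _ h _ => absurd h (Nat.not_lt_zero _)
  | succ fuel ih =>
    intro verts memo hnd hlt hgood
    rcases hm : memo.get? verts with _ | r
    · rcases he : verts.isEmpty with _ | _
      · -- non-empty vertex set: branch on the pivot
        have hvne : verts ≠ [] := fun h => by simp [h] at he
        set v := PySem.List.maxD verts
            (fun u => (PySem.Set.inter
              ((pvAdjDict (cl.map PySem.Set.ofList) cl.length).getD u PySem.Set.empty) verts).length) 0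
          with hvdef
        have hvm : v ∈ verts := PySem.List.maxD_mem _ _ _ hvne
        have hlt1 : (PySem.Set.diff verts [v]).length < fuel + 1 := by
          have := pvDiff_singleton_lt verts v hvm; omega
        obtain ⟨h1, g1⟩ := ih (PySem.Set.diff verts [v]) memo
          (PySem.Set.nodup_diff _ _ hnd) (by have := pvDiff_singleton_lt verts v hvm; omega) hgood
        set adjv := (pvAdjDict (cl.map PySem.Set.ofList) cl.length).getD v PySem.Set.empty with hadjv
        obtain ⟨h2, g2⟩ := ih
          (PySem.Set.diff (PySem.Set.diff verts (PySem.Set.inter adjv verts)) [v]) _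
          (PySem.Set.nodup_diff _ _ (PySem.Set.nodup_diff _ _ hnd))
          (by have := pvDiff_lt verts (PySem.Set.inter adjv verts) v hvm; omega) g1
        have hp2 : (PySem.Set.diff (PySem.Set.diff verts (PySem.Set.inter adjv verts)) [v]).toFinset
            = (verts.toFinset.erase v).filter (fun u => pvAdj cl v u = false) := by
          ext u
          simp only [List.mem_toFinset, PySem.Set.mem_diff, PySem.Set.mem_inter, Finset.mem_filter,
            Finset.mem_erase, List.mem_singleton]
          constructor
          · rintro ⟨⟨hu, hni⟩, hne⟩
            refine ⟨⟨hne, hu⟩, ?_⟩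
            rw [← Bool.not_eq_true]
            intro hadj
            exact hni ⟨(pvAdjDict_getD cl v u).mpr hadj, hu⟩
          · rintro ⟨⟨hne, hu⟩, hfalse⟩
            refine ⟨⟨hu, ?_⟩, hne⟩
            rintro ⟨hadj, -⟩
            rw [(pvAdjDict_getD cl v u).mp hadj] at hfalse
            cases hfalse
        have hres : (pvSolve (pvAdjDict (cl.map PySem.Set.ofList) cl.length) fuel
              (PySem.Set.diff verts [v]) memo).1 +
            2 * (pvSolve (pvAdjDict (cl.map PySem.Set.ofList) cl.length) fuel
              (PySem.Set.diff (PySem.Set.diff verts (PySem.Set.inter adjv verts)) [v])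
              (pvSolve (pvAdjDict (cl.map PySem.Set.ofList) cl.length) fuel
                (PySem.Set.diff verts [v]) memo).2).1 = pvIS cl verts.toFinset := by
          rw [h1, h2, pvDiff_singleton_toFinset, hp2]
          exact (pvIS_erase cl verts.toFinset v (List.mem_toFinset.mpr hvm)).symm
        have hstep : pvSolve (pvAdjDict (cl.map PySem.Set.ofList) cl.length) (fuel + 1) verts memo =
            (let p := (pvSolve (pvAdjDict (cl.map PySem.Set.ofList) cl.length) fuel
                (PySem.Set.diff verts [v]) memo);
             let q := (pvSolve (pvAdjDict (cl.map PySem.Set.ofList) cl.length) fuel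
                (PySem.Set.diff (PySem.Set.diff verts (PySem.Set.inter adjv verts)) [v]) p.2);
             (p.1 + 2 * q.1, q.2.insert verts (p.1 + 2 * q.1))) := by
          simp only [pvSolve, hm]
          rw [if_neg (by simp [he])]
        rw [hstep]
        constructor
        · exact hres
        · intro k r hk
          simp only at hk
          rw [PySem.Dict.get?_insert] at hk
          split_ifs at hk with hkv
          · cases hk
            rw [hkv]
            exact hres
          · exact g2 _ _ hk
      · -- verts is empty
        have hnil : verts = [] := List.isEmpty_iff.mp he
        subst hnil
        have hstep : pvSolve (pvAdjDict (cl.map PySem.Set.ofList) cl.length) (fuel + 1) [] memo =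
            (1, memo) := by
          simp only [pvSolve, hm]
          rw [if_pos he]
        rw [hstep]
        exact ⟨by simp [pvIS_empty], hgood⟩
    · -- memo hit
      have hstep : pvSolve (pvAdjDict (cl.map PySem.Set.ofList) cl.length) (fuel + 1) verts memo =
          (r, memo) := by
        simp only [pvSolve, hm]
      rw [hstep]
      exact ⟨hgood _ _ hm, hgood⟩

lemma pvA_eq_IS (cl : List (List Int)) :
    I_at_2_fast cl = pvIS cl (PySem.List.pyRange 0 cl.length 1).toFinset := by
  by_cases h0 : cl.length = 0
  · have hnil : PySem.List.pyRange 0 (cl.length : Int) 1 = [] :=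
      PySem.List.pyRange_one_eq_nil (by simp [h0])
    rw [hnil]
    simp [I_at_2_fast, h0, pvIS_empty]
  · have hnodup := PySem.List.nodup_pyRange_one (0 : Int) cl.length
    have hofl : PySem.Set.ofList (PySem.List.pyRange 0 (cl.length : Int) 1) =
        PySem.List.pyRange 0 (cl.length : Int) 1 :=
      PySem.Set.ofList_eq_self_of_nodup _ hnodup
    have hlen : (PySem.List.pyRange 0 (cl.length : Int) 1).length = cl.length := by
      rw [PySem.List.length_pyRange_one]; simp
    have hmain := (pvSolve_correct cl (cl.length + 1)
      (PySem.List.pyRange 0 (cl.length : Int) 1) PySem.Dict.empty hnodup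
      (by omega)
      (fun k r h => by rw [PySem.Dict.get?_empty] at h; cases h)).1
    simp only [I_at_2_fast, if_neg h0]
    rw [hofl]
    exact hmain

-- B-side
lemma pvB_loop (cl : List (List Int)) (k : Nat) (hk : k ≤ cl.length) :
    (PySem.List.pyRange 0 k 1).foldl
      (fun sets v =>
        sets ++ (sets.filter (fun s =>
          s.all (fun u => !pvOverlap (pvCvAt (cl.map PySem.Set.ofList) u)
            (pvCvAt (cl.map PySem.Set.ofList) v)))).map (fun s => s ++ [v]))
      [[]] =
    (PySem.List.pyRange 0 k 1).sublists.filter (pvIndB cl) := by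
  induction k with
  | zero =>
    simp [pvIndB]
  | succ k ih =>
    have hcast : ((k + 1 : Nat) : Int) = (k : Int) + 1 := by push_cast; ring
    rw [hcast, PySem.List.pyRange_one_succ_right (Int.natCast_nonneg k),
      List.foldl_append, List.foldl_cons, List.foldl_nil, ih (by omega),
      List.sublists_concat, List.filter_append, List.filter_map, List.filter_filter]
    congr 1
    congr 1
    apply List.filter_congr
    intro s hs
    have hsub : ∀ u ∈ s, 0 ≤ u ∧ u < (k : Int) := fun u hu =>
      PySem.List.mem_pyRange_one.mp ((List.mem_sublists.mp hs).subset hu)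
    have hk' : (k : Int) < (cl.length : Int) := by omega
    have hpt : ∀ u ∈ s,
        ((!pvOverlap (pvCvAt (cl.map PySem.Set.ofList) u) (pvCvAt (cl.map PySem.Set.ofList) ((k : Nat) : Int))) = true
          ↔ pvAdj cl ((k : Nat) : Int) u = false) := by
      intro u hu
      obtain ⟨hu0, huk⟩ := hsub u hu
      have heq : pvAdj cl ((k : Nat) : Int) u =
          pvOverlap (pvCvAt (cl.map PySem.Set.ofList) u) (pvCvAt (cl.map PySem.Set.ofList) ((k : Nat) : Int)) := by
        simp only [pvAdj]
        rw [pvOverlap_symm]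
        simp [show ((k : Nat) : Int) ≠ u from by omega, show (0 : Int) ≤ ((k : Nat) : Int) from Int.natCast_nonneg k,
          hk', hu0, show u < (cl.length : Int) from by omega]
      rw [heq, Bool.not_eq_true']
    simp only [Function.comp_apply]
    rw [Bool.eq_iff_iff, Bool.and_eq_true, pvIndB_concat, List.all_eq_true]
    constructor
    · rintro ⟨h1, h2⟩
      exact ⟨h2, fun u hu => (hpt u hu).mp (h1 u hu)⟩
    · rintro ⟨h1, h2⟩
      exact ⟨fun u hu => (hpt u hu).mpr (h2 u hu), h1⟩

lemma pvSum_sublists_filter (p : Int → Bool) :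
    ∀ (l : List Int) (q : List Int → Bool) (g : List Int → Int),
      (((l.filter p).sublists.filter q).map g).sum =
        ((l.sublists.filter (fun s => q s && s.all p)).map g).sum := by
  intro l
  induction l using List.reverseRecOn with
  | nil =>
    intro q g
    cases hq : q [] <;> simp [hq]
  | append_singleton l a ih =>
    intro q g
    rcases hpa : p a with _ | _
    · -- p a = false : the new element never survives the filter
      have hf : (l ++ [a]).filter p = l.filter p := by
        rw [List.filter_append]
        simp [hpa]
      rw [hf, ih q g, List.sublists_concat, List.filter_append, List.filter_map]
      have hz : (l.sublists.filter ((fun s => q s && s.all p) ∘ (fun x => x ++ [a]))) = [] := by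
        apply List.filter_eq_nil_iff.mpr
        intro s _
        simp [List.all_append, hpa]
      rw [hz]
      simp
    · -- p a = true
      have hf : (l ++ [a]).filter p = l.filter p ++ [a] := by
        rw [List.filter_append]
        simp [hpa]
      rw [hf, List.sublists_concat, List.sublists_concat,
        List.filter_append, List.filter_append, List.filter_map, List.filter_map,
        List.map_append, List.map_append, List.sum_append, List.sum_append,
        List.map_map, List.map_map]
      simp only [Function.comp_def]
      congr 1
      · exact ih q g
      · rw [ih (fun s => q (s ++ [a])) (fun s => g (s ++ [a]))]
        congr 1
        congr 1
        apply List.filter_congr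
        intro s _
        simp [List.all_append, hpa]

lemma pvSum_indep (cl : List (List Int)) :
    ∀ (n : Nat) (l : List Int), l.length ≤ n → l.Nodup →
      (((l.sublists.filter (pvIndB cl)).map
          (fun s => (2 : Int) ^ s.length)).sum = pvIS cl l.toFinset) := by
  intro n
  induction n with
  | zero =>
    intro l hl _
    have : l = [] := List.length_eq_zero_iff.mp (Nat.le_zero.mp hl)
    subst this
    simp [pvIndB, pvIS_empty]
  | succ n ih =>
    intro l hl hnd
    rcases List.eq_nil_or_concat l with rfl | ⟨l', a, rfl⟩
    · simp [pvIndB, pvIS_empty]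
    rw [List.concat_eq_append] at *
    have hnd' : l'.Nodup ∧ a ∉ l' := by
      rw [List.nodup_append] at hnd
      exact ⟨hnd.1, fun h => hnd.2.2 a h a (List.mem_singleton_self a) rfl⟩
    have hlen' : l'.length ≤ n := by
      rw [List.length_append] at hl
      simp at hl
      omega
    -- split the sublists of l' ++ [a]
    rw [List.sublists_concat, List.filter_append, List.filter_map, List.map_append,
      List.sum_append, List.map_map]
    simp only [Function.comp_def]
    -- condition on the new sublists
    have hcond : ∀ s ∈ l'.sublists,
        pvIndB cl (s ++ [a]) =
          (pvIndB cl s && s.all (fun u => !pvAdj cl a u)) := by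
      intro s _
      rw [Bool.eq_iff_iff, pvIndB_concat, Bool.and_eq_true, List.all_eq_true]
      simp
    rw [List.filter_congr hcond]
    -- turn it into a sum over the sublists of the filtered list
    have hswap := pvSum_sublists_filter (fun u => !pvAdj cl a u) l' (pvIndB cl)
      (fun s => (2 : Int) ^ (s ++ [a]).length)
    rw [← hswap]
    -- 2^(len+1) = 2 * 2^len
    have hpow : ((l'.filter (fun u => !pvAdj cl a u)).sublists.filter (pvIndB cl)).map
          (fun s => (2 : Int) ^ (s ++ [a]).length) =
        ((l'.filter (fun u => !pvAdj cl a u)).sublists.filter (pvIndB cl)).map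
          (fun s => 2 * (2 : Int) ^ s.length) := by
      apply List.map_congr_left
      intro s _
      rw [List.length_append, List.length_singleton, pow_succ]
      ring
    rw [hpow, List.sum_map_mul_left,
      ih l' hlen' hnd'.1,
      ih (l'.filter (fun u => !pvAdj cl a u)) (le_trans (List.length_filter_le _ _) hlen')
        (hnd'.1.filter _)]
    -- identify the finsets
    have htf : (l' ++ [a]).toFinset = insert a l'.toFinset := by
      ext x
      simp
    have htf2 : (l'.filter (fun u => !pvAdj cl a u)).toFinset =
        l'.toFinset.filter (fun u => pvAdj cl a u = false) := by
      ext x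
      simp
    rw [htf, htf2, pvIS_insert cl l'.toFinset a (fun h => hnd'.2 (List.mem_toFinset.mp h))]

lemma pvB_eq_IS (cl : List (List Int)) :
    I_at_2_fast_alt cl = pvIS cl (PySem.List.pyRange 0 cl.length 1).toFinset := by
  have hlen : (PySem.List.pyRange 0 (cl.length : Int) 1).length = cl.length := by
    rw [PySem.List.length_pyRange_one]; simp
  simp only [I_at_2_fast_alt]
  rw [pvB_loop cl cl.length le_rfl]
  exact pvSum_indep cl cl.length _ (le_of_eq hlen) (PySem.List.nodup_pyRange_one 0 cl.length)

-- ===== VERDICT (by name: the statement is the Claim_ definition above) =====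
theorem I_at_2_fast_spec : Claim_equal_I_at_2_fast := by
  intro cl _
  unfold Spec_I_at_2_fast
  rw [pvA_eq_IS, pvB_eq_IS]
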